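-- pv_equiv track=rewrite | github.com/thnam1996/project2_Crawlingtikiproduct | io_utils.py | iter_ids
-- ===== SOURCE A (Python) =====
-- def iter_ids(list_product, batch_size: int = 1000):
--     buf = []
--
--     for row in list_product:
--         if row:
--             buf.append(row.strip())
--             if len(buf) >= batch_size:
--                 yield buf
--                 buf = []
--     if buf:
--         yield buf
-- ===== SOURCE B (Python) =====
-- def iter_ids(list_product, batch_size: int = 1000):
--     items = [row.strip() for row in list_product if row]
--     for i in range(0, len(items), batch_size):
--         yield items[i:i + batch_size]
-- ===== Notes on version B (the rewrite author's own statement) =====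
-- stated objective: idiomatic
-- what changed: Replaces the manual accumulator buffer and per-element length check with a single comprehension that cleans all rows once, then emits stride-batch_size slices over a range.
-- outside the precondition, e.g. on iter_ids(['a', 'b'], 0): A returns [['a'], ['b']], B raises ValueError; on iter_ids(['a', 'b'], -1): A returns [['a'], ['b']], B returns []
import Mathlib
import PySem

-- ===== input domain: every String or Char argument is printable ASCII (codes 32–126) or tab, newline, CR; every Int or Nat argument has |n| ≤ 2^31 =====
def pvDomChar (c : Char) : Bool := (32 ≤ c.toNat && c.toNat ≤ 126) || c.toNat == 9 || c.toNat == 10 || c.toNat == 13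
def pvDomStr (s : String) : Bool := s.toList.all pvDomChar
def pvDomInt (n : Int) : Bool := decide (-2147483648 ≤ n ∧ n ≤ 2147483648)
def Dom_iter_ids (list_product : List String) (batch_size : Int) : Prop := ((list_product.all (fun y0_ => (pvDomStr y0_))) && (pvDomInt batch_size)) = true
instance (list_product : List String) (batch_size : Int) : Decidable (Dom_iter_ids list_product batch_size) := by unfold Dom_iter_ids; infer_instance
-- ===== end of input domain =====

-- B replaces A's manual accumulator buffer with a clean-once comprehension followed by
-- stride-batch_size slices over a range (idiomatic; same asymptotic cost).


-- ===== PORT A =====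
-- the generator loop: state = (emitted chunks, current buffer)
def iterIdsGo (bs : Int) : List String → List (List String) → List String → List (List String)
  | [], acc, buf => if buf = [] then acc else acc ++ [buf]
  | r :: rs, acc, buf =>
    if r = "" then iterIdsGo bs rs acc buf
    else
      let buf' := buf ++ [PySem.Str.strip r]
      if bs ≤ (buf'.length : Int) then iterIdsGo bs rs (acc ++ [buf']) []
      else iterIdsGo bs rs acc buf'

def iter_ids (list_product : List String) (batch_size : Int) : List (List String) :=
  iterIdsGo batch_size list_product [] []

-- ===== PORT B =====
def iter_ids_alt (list_product : List String) (batch_size : Int) : List (List String) :=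
  let items := (list_product.filter (fun r => !(r = ""))).map PySem.Str.strip
  (PySem.List.pyRange 0 (items.length : Int) batch_size).map
    (fun i => PySem.List.slice items (some i) (some (i + batch_size)))

-- ===== PRECONDITION & SPEC =====
-- Pre_ excludes batch_size ≤ 0, where A's one-row-per-chunk output is an accident of the
-- 'len(buf) >= batch_size' test firing on every append; B raises ValueError at 0 and yields
-- nothing for negative sizes.
def Pre_iter_ids (list_product : List String) (batch_size : Int) : Prop := 1 ≤ batch_size
instance (list_product : List String) (batch_size : Int) : Decidable (Pre_iter_ids list_product batch_size) := by unfold Pre_iter_ids; infer_instance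

def pvWitness_iter_ids : List String × Int := (["  x ", "", "y", "z"], 2)

def Spec_iter_ids (list_product : List String) (batch_size : Int) (out : List (List String)) : Prop := out = iter_ids_alt list_product batch_size
instance (list_product : List String) (batch_size : Int) (out : List (List String)) : Decidable (Spec_iter_ids list_product batch_size out) := by unfold Spec_iter_ids; infer_instance

-- ===== CLAIM (what is proved, stated in full; the proofs are below) =====
def Claim_equal_iter_ids : Prop := ∀ (list_product : List String) (batch_size : Int), Dom_iter_ids list_product batch_size → Pre_iter_ids list_product batch_size → Spec_iter_ids list_product batch_size (iter_ids list_product batch_size)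

-- ===== LEMMAS AND PROOFS =====

-- proof-only helper: the batches of size m+1 of a list
def pvChunks (m : Nat) : List String → List (List String)
  | [] => []
  | x :: xs => (x :: xs).take (m + 1) :: pvChunks m ((x :: xs).drop (m + 1))
termination_by l => l.length
decreasing_by simp

def pvClean (lp : List String) : List String :=
  (lp.filter (fun r => !(r = ""))).map PySem.Str.strip

lemma pvChunks_nil (m : Nat) : pvChunks m [] = [] := by simp [pvChunks]

lemma pvChunks_cons (m : Nat) (x : String) (xs : List String) :
    pvChunks m (x :: xs) = (x :: xs).take (m + 1) :: pvChunks m ((x :: xs).drop (m + 1)) := by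
  rw [pvChunks]

lemma pvChunks_small {m : Nat} {l : List String} (h : l.length ≤ m + 1) (hne : l ≠ []) :
    pvChunks m l = [l] := by
  cases l with
  | nil => exact absurd rfl hne
  | cons x xs =>
    rw [pvChunks_cons, List.take_of_length_le h, List.drop_of_length_le h, pvChunks_nil]

lemma pvChunks_exact {m : Nat} {l rest : List String} (h : l.length = m + 1) :
    pvChunks m (l ++ rest) = l :: pvChunks m rest := by
  cases l with
  | nil => simp at h
  | cons x xs =>
    rw [List.cons_append, pvChunks_cons, ← List.cons_append,
        List.take_left' h, List.drop_left' h]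

lemma iterIdsGo_eq (bs : Int) (hbs : 1 ≤ bs) :
    ∀ (lp : List String) (acc : List (List String)) (buf : List String),
      (buf.length : Int) < bs →
      iterIdsGo bs lp acc buf = acc ++ pvChunks (bs.toNat - 1) (buf ++ pvClean lp) := by
  intro lp
  induction lp with
  | nil =>
    intro acc buf h
    simp only [iterIdsGo, pvClean, List.filter_nil, List.map_nil, List.append_nil]
    by_cases hb : buf = []
    · simp [hb, pvChunks_nil]
    · rw [if_neg hb, pvChunks_small _ hb]
      omega
  | cons r rs ih =>
    intro acc buf h
    by_cases hr : r = ""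
    · rw [iterIdsGo, if_pos hr]
      rw [ih acc buf h]
      simp [pvClean, hr]
    · rw [iterIdsGo, if_neg hr]
      have hclean : pvClean (r :: rs) = PySem.Str.strip r :: pvClean rs := by
        simp [pvClean, hr]
      by_cases hfull : bs ≤ ((buf ++ [PySem.Str.strip r]).length : Int)
      · rw [if_pos hfull]
        have hlen : (buf ++ [PySem.Str.strip r]).length = bs.toNat - 1 + 1 := by
          simp at hfull ⊢; omega
        rw [ih (acc ++ [buf ++ [PySem.Str.strip r]]) [] (by simp; omega)]
        rw [hclean, show buf ++ PySem.Str.strip r :: pvClean rs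
              = (buf ++ [PySem.Str.strip r]) ++ pvClean rs from by simp,
            pvChunks_exact hlen]
        simp
      · rw [if_neg hfull]
        rw [ih acc (buf ++ [PySem.Str.strip r]) (by push_neg at hfull; exact hfull)]
        rw [hclean, List.append_assoc]
        simp

lemma pyRange_pos_count (a b s : Int) (hs : 0 < s) (hab : a < b) (hsmall : b ≤ a + s) :
    PySem.List.pyRange a b s = [a] := by
  rw [PySem.List.pyRange_of_pos _ _ hs, if_pos hab]
  have h1 : (b - a + s - 1) / s = 1 := by
    have h0 : b - a + s - 1 = (b - a - 1) + 1 * s := by ring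
    rw [h0, Int.add_mul_ediv_right _ _ (by omega),
        Int.ediv_eq_zero_of_lt (by omega) (by omega)]
    omega
  rw [h1]
  norm_num

lemma pyRange_pos_cons (a b s : Int) (hs : 0 < s) (hab : a < b) (hbig : a + s < b) :
    PySem.List.pyRange a b s = a :: PySem.List.pyRange (a + s) b s := by
  rw [PySem.List.pyRange_of_pos _ _ hs, PySem.List.pyRange_of_pos _ _ hs,
      if_pos hab, if_pos hbig]
  have h1 : b - a + s - 1 = (b - (a + s) + s - 1) + 1 * s := by ring
  rw [h1, Int.add_mul_ediv_right _ _ (by omega)]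
  have h2 : 0 ≤ (b - (a + s) + s - 1) / s := Int.ediv_nonneg (by omega) (by omega)
  have h3 : ((b - (a + s) + s - 1) / s + 1).toNat = ((b - (a + s) + s - 1) / s).toNat + 1 := by
    omega
  rw [h3, List.range_succ_eq_map]
  simp only [List.map_cons, List.map_map]
  congr 1
  · simp
  · apply List.map_congr_left
    intro k _
    simp only [Function.comp_apply, Nat.succ_eq_add_one]
    push_cast
    ring

lemma pyRange_shift (a b s : Int) (hs : 0 < s) :
    PySem.List.pyRange a b s = (PySem.List.pyRange 0 (b - a) s).map (fun k => k + a) := by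
  rw [PySem.List.pyRange_of_pos _ _ hs, PySem.List.pyRange_of_pos _ _ hs]
  have hiff : a < b ↔ 0 < b - a := by omega
  rw [if_congr hiff rfl rfl]
  by_cases h : 0 < b - a
  · rw [if_pos h, if_pos h, List.map_map,
        show b - a - 0 + s - 1 = b - a + s - 1 from by ring]
    apply List.map_congr_left
    intro k _
    simp only [Function.comp_apply]
    ring
  · rw [if_neg h, if_neg h]
    simp

lemma alt_eq_chunks (s : Int) (hs : 1 ≤ s) (items : List String) :
    (PySem.List.pyRange 0 (items.length : Int) s).map
      (fun i => PySem.List.slice items (some i) (some (i + s)))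
    = pvChunks (s.toNat - 1) items := by
  cases items with
  | nil =>
    rw [pvChunks_nil, PySem.List.pyRange_of_pos _ _ (by omega : (0:Int) < s)]
    simp
  | cons x xs =>
    have hpos : (0 : Int) < ((x :: xs).length : Int) := by simp
    by_cases hsmall : ((x :: xs).length : Int) ≤ 0 + s
    · rw [pyRange_pos_count 0 _ s (by omega) hpos hsmall]
      have hslice : PySem.List.slice (x :: xs) (some 0) (some (0 + s)) = x :: xs := by
        rw [PySem.List.slice_toNat _ le_rfl (by omega)]
        simp only [Int.toNat_zero, List.drop_zero, Nat.sub_zero]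
        exact List.take_of_length_le (by simp at hsmall ⊢; omega)
      rw [List.map_cons, List.map_nil, hslice,
          pvChunks_small (by simp at hsmall ⊢; omega) (by simp)]
    · push_neg at hsmall
      rw [pyRange_pos_cons 0 _ s (by omega) hpos hsmall, List.map_cons]
      have hhead : PySem.List.slice (x :: xs) (some 0) (some (0 + s)) =
          (x :: xs).take s.toNat := by
        rw [PySem.List.slice_toNat _ le_rfl (by omega)]
        simp
      have hdroplen : (((x :: xs).drop s.toNat).length : Int) = ((x :: xs).length : Int) - s := by
        rw [List.length_drop]
        simp only [List.length_cons] at hsmall ⊢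
        omega
      have htail : (PySem.List.pyRange (0 + s) ((x :: xs).length : Int) s).map
            (fun i => PySem.List.slice (x :: xs) (some i) (some (i + s)))
          = (PySem.List.pyRange 0 ((((x :: xs).drop s.toNat).length : Int)) s).map
            (fun i => PySem.List.slice ((x :: xs).drop s.toNat) (some i) (some (i + s))) := by
        rw [hdroplen, pyRange_shift (0 + s) _ s (by omega),
            show ((x :: xs).length : Int) - (0 + s) = ((x :: xs).length : Int) - s from by ring,
            List.map_map]
        apply List.map_congr_left
        intro k hk
        have hk0 : 0 ≤ k := by
          have := (PySem.List.mem_pyRange_iff_of_pos (by omega : (0:Int) < s) k).1 hk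
          omega
        simp only [Function.comp_apply]
        rw [PySem.List.slice_toNat _ (by omega) (by omega),
            PySem.List.slice_toNat _ (by omega) (by omega),
            List.drop_drop]
        congr 1
        · omega
        · congr 1
          omega
      rw [htail, alt_eq_chunks s hs ((x :: xs).drop s.toNat), hhead]
      conv_rhs => rw [pvChunks_cons]
      rw [show s.toNat - 1 + 1 = s.toNat from by omega]
termination_by items.length
decreasing_by simp; omega

-- ===== VERDICT (by name: the statement is the Claim_ definition above) =====
theorem iter_ids_spec : Claim_equal_iter_ids := by
  intro lp bs _ hpre
  unfold Spec_iter_ids iter_ids iter_ids_alt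
  rw [iterIdsGo_eq bs hpre lp [] [] (by simpa using hpre)]
  rw [alt_eq_chunks bs hpre]
  simp [pvClean]
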